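-- pv_equiv track=rewrite | github.com/MrBrantCode/unitest_baseline | mut_generate/mist_train_cf/cf_18476/solution.py | word_lengths
-- ===== SOURCE A (Python) =====
-- def word_lengths(string):
--     # Remove punctuation marks, numbers, and special characters
--     string = ''.join(c for c in string if c.isalpha() or c.isspace())
--
--     # Split the string into words
--     words = string.split()
--
--     # Calculate the length of each word and store them in a dictionary
--     lengths = {}
--     for word in words:
--         length = len(word)
--         if length not in lengths:
--             lengths[length] = []
--         lengths[length].append(word)
--
--     # Sort the lengths in descending order
--     sorted_lengths = sorted(lengths.keys(), reverse=True)
--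
--     # Sort words with the same length in reverse alphabetical order
--     sorted_words = []
--     for length in sorted_lengths:
--         sorted_words.extend(sorted(lengths[length], reverse=True))
--
--     # Create the final output array
--     output = []
--     for word in sorted_words:
--         output.append(len(word))
--
--     return output
-- ===== SOURCE B (Python) =====
-- def word_lengths(string):
--     cleaned = ''.join(c for c in string if c.isalpha() or c.isspace())
--     return sorted((len(w) for w in cleaned.split()), reverse=True)
-- ===== Notes on version B (the rewrite author's own statement) =====
-- stated objective: simpler
-- what changed: Drops the length-keyed dict grouping, per-group reverse-alphabetical word sorts and the final re-derivation of lengths; B maps each word to its length and sorts that list descending in one pass.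
import Mathlib
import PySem

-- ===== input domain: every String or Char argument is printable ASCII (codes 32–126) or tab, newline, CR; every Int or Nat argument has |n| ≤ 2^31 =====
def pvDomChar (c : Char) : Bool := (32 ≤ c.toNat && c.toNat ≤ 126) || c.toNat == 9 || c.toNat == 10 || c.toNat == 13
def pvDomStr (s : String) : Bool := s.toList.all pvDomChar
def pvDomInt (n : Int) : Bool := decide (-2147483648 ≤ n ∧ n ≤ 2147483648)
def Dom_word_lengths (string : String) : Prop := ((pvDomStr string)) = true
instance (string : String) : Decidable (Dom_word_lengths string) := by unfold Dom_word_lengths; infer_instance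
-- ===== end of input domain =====

-- B replaces A's dict-grouping / per-group sorting / length re-derivation by mapping words to lengths and sorting once descending (simpler decomposition, same result).


-- ===== PORT A =====
-- literal port of A: clean chars, split, group words in a length-keyed dict,
-- sort keys descending, sort each group reverse-alphabetically, emit lengths
def word_lengths (string : String) : List Int :=
  let cleaned : List Char := string.toList.filter (fun c => PySem.Chars.isalpha c || PySem.Chars.isspace c)
  let words : List (List Char) := PySem.Chars.split₀ cleaned
  let lengths : PySem.Dict Int (List (List Char)) :=
    words.foldl (fun d w =>
      let length : Int := (w.length : Int)
      let d := if d.contains length then d else d.insert length []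
      d.modify length [] (fun l => l ++ [w])) PySem.Dict.empty
  let sorted_lengths : List Int := PySem.List.sorted lengths.keys (fun x => x) true
  let sorted_words : List (List Char) :=
    sorted_lengths.foldl (fun acc length =>
      acc ++ PySem.List.sorted (lengths.getD length []) (fun x => x) true) []
  sorted_words.foldl (fun out w => out ++ [(w.length : Int)]) []

-- ===== PORT B =====
-- B: map each word to its length, then one descending sort
def word_lengths_alt (string : String) : List Int :=
  let cleaned : List Char := string.toList.filter (fun c => PySem.Chars.isalpha c || PySem.Chars.isspace c)
  let words : List (List Char) := PySem.Chars.split₀ cleaned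
  PySem.List.sorted (words.map (fun w => (w.length : Int))) (fun x => x) true

-- ===== PRECONDITION & SPEC =====
def Spec_word_lengths (string : String) (out : List Int) : Prop := out = word_lengths_alt string
instance (string : String) (out : List Int) : Decidable (Spec_word_lengths string out) := by unfold Spec_word_lengths; infer_instance

-- ===== CLAIM (what is proved, stated in full; the proofs are below) =====
def Claim_equal_word_lengths : Prop := ∀ (string : String), Dom_word_lengths string → Spec_word_lengths string (word_lengths string)

-- ===== LEMMAS AND PROOFS =====

-- one step of A's dict-building loop (the literal lambda of the port)
def pvStep (d : PySem.Dict Int (List (List Char))) (w : List Char) : PySem.Dict Int (List (List Char)) :=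
  let length : Int := (w.length : Int)
  let d := if d.contains length then d else d.insert length []
  d.modify length [] (fun l => l ++ [w])

-- group content: A's dict maps k to the words of length k, in word order
theorem pvStep_getD (ws : List (List Char)) (d : PySem.Dict Int (List (List Char))) (k : Int) :
    (ws.foldl pvStep d).getD k [] = d.getD k [] ++ ws.filter (fun w => (w.length : Int) == k) := by
  induction ws generalizing d with
  | nil => simp
  | cons w ws ih =>
    rw [List.foldl_cons, ih]
    have hstep : (pvStep d w).getD k [] =
        d.getD k [] ++ (if ((w.length : Int) == k) then [w] else []) := by
      unfold pvStep
      simp only []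
      rw [PySem.Dict.getD_modify]
      by_cases hk : k = (w.length : Int)
      · subst hk
        simp only [beq_self_eq_true, if_true]
        by_cases hc : d.contains ((w.length : Int)) = true
        · rw [if_pos hc]
        · rw [if_neg hc, PySem.Dict.getD_insert, if_pos rfl,
              PySem.Dict.getD_of_not_contains d ([] : List (List Char)) (by simpa using hc)]

      · have hbk : ((w.length : Int) == k) = false := by simp [Ne.symm hk]
        rw [if_neg hk, hbk]
        simp only [Bool.false_eq_true, if_false, List.append_nil]
        by_cases hc : d.contains (w.length : Int) = true
        · rw [if_pos hc]
        · rw [if_neg hc, PySem.Dict.getD_insert, if_neg hk]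
    rw [hstep, List.filter_cons]
    by_cases hb : ((w.length : Int) == k) = true
    · simp [hb]
    · simp [hb]

-- keys of A's dict: the distinct word lengths, in first-appearance order
theorem pvStep_keys (ws : List (List Char)) (d : PySem.Dict Int (List (List Char))) :
    (ws.foldl pvStep d).keys = ws.foldl (fun s w => PySem.Set.add s ((w.length : Int))) d.keys := by
  induction ws generalizing d with
  | nil => rfl
  | cons w ws ih =>
    rw [List.foldl_cons, List.foldl_cons, ih]
    congr 1
    unfold pvStep
    simp only []
    rw [PySem.Dict.keys_modify]
    by_cases hc : d.contains (w.length : Int) = true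
    · rw [if_pos hc, PySem.Dict.keys_insert_of_contains _ _ hc,
          PySem.Set.add_of_mem ((PySem.Dict.contains_iff_mem_keys _ _).mp hc)]
    · have hnm : ((w.length : Int)) ∉ d.keys := fun h =>
        absurd ((PySem.Dict.contains_iff_mem_keys _ _).mpr h) (by simp [hc])
      rw [if_neg hc,
          PySem.Dict.keys_insert_of_contains _ _ (PySem.Dict.contains_insert_self d _ _),
          PySem.Dict.keys_insert_of_not_contains _ _ (by simpa using hc),
          PySem.Set.add_of_not_mem hnm]

-- count of a value in a flatMap of replicates over a duplicate-free key list
theorem pvCount_flatMap (K : List Int) (n : Int → Nat) (hnd : K.Nodup) (a : Int) :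
    (K.flatMap (fun k => List.replicate (n k) k)).count a = if a ∈ K then n a else 0 := by
  induction K with
  | nil => simp
  | cons k K ih =>
    rw [List.flatMap_cons, List.count_append, ih hnd.of_cons, List.count_replicate]
    by_cases hk : a = k
    · subst hk
      have : a ∉ K := (List.nodup_cons.mp hnd).1
      simp [this]
    · simp [hk, Ne.symm hk]

-- a flatMap of constant blocks over a strictly decreasing key list is weakly decreasing
theorem pvPairwise_flatMap (K : List Int) (n : Int → Nat)
    (h : K.Pairwise (fun a b => b < a)) :
    (K.flatMap (fun k => List.replicate (n k) k)).Pairwise (fun a b => b ≤ a) := by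
  induction K with
  | nil => simp
  | cons k K ih =>
    rw [List.flatMap_cons, List.pairwise_append]
    refine ⟨List.pairwise_replicate.mpr (Or.inr le_rfl), ih h.of_cons, ?_⟩
    intro a ha b hb
    rw [List.eq_of_mem_replicate ha]
    obtain ⟨k', hk', hb'⟩ := List.mem_flatMap.mp hb
    rw [List.eq_of_mem_replicate hb']
    exact le_of_lt ((List.pairwise_cons.mp h).1 k' hk')

-- the main combinatorial fact: flattening descending-sorted distinct keys,
-- each repeated by its multiplicity in L, is exactly sorted(L, reverse=True)
theorem pvFlat_eq_sorted (K L : List Int) (hnd : K.Nodup)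
    (hmem : ∀ a, a ∈ K ↔ a ∈ L) (hpw : K.Pairwise (fun a b => b ≤ a)) :
    K.flatMap (fun k => List.replicate (L.count k) k)
      = PySem.List.sorted L (fun x => x) true := by
  have hgt : K.Pairwise (fun a b => b < a) := by
    have h2 : K.Pairwise (fun a b : Int => a ≠ b) := hnd.imp (fun h => h)
    exact (hpw.and h2).imp (fun h => lt_of_le_of_ne h.1 (Ne.symm h.2))
  apply List.Perm.eq_of_pairwise (le := fun a b : Int => b ≤ a)
  · intro a b _ _ h1 h2; exact le_antisymm h2 h1
  · exact pvPairwise_flatMap K _ hgt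
  · exact PySem.List.sorted_pairwise_rev L (fun x => x)
  · rw [List.perm_iff_count]
    intro a
    rw [pvCount_flatMap K _ hnd a,
        (PySem.List.sorted_perm L (fun x => x) true).count_eq a]
    by_cases ha : a ∈ K
    · rw [if_pos ha]
    · rw [if_neg ha, eq_comm, List.count_eq_zero]
      exact fun h => ha ((hmem a).mpr h)

-- lengths of a reverse-sorted group of words all of length k
theorem pvGroup_map (G : List (List Char)) (k : Int)
    (h : ∀ w ∈ G, (w.length : Int) = k) :
    (PySem.List.sorted G (fun x => x) true).map (fun w => (w.length : Int))
      = List.replicate G.length k := by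
  rw [List.eq_replicate_iff]
  constructor
  · rw [List.length_map, (PySem.List.sorted_perm G (fun x => x) true).length_eq]
  · intro b hb
    obtain ⟨w, hw, hwb⟩ := List.mem_map.mp hb
    rw [← hwb]
    exact h w ((PySem.List.mem_sorted G (fun x => x) true w).mp hw)

-- flatMap congruence on members
theorem pvFlatMap_congr {α β : Type} (K : List α) (f g : α → List β)
    (h : ∀ k ∈ K, f k = g k) : K.flatMap f = K.flatMap g := by
  induction K with
  | nil => rfl
  | cons k K ih =>
    rw [List.flatMap_cons, List.flatMap_cons, h k (List.mem_cons_self),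
        ih (fun k hk => h k (List.mem_cons_of_mem _ hk))]

-- the whole pipeline of A, for any word list, equals B's single sort
theorem pvMain (words : List (List Char)) :
    (((PySem.List.sorted
        (words.foldl pvStep PySem.Dict.empty).keys (fun x => x) true).foldl
        (fun acc length => acc ++ PySem.List.sorted
          ((words.foldl pvStep PySem.Dict.empty).getD length []) (fun x => x) true) []).foldl
        (fun out w => out ++ [(w.length : Int)]) [])
      = PySem.List.sorted (words.map (fun w => (w.length : Int))) (fun x => x) true := by
  set L : List Int := words.map (fun w => (w.length : Int)) with hL
  set lengths := words.foldl pvStep PySem.Dict.empty with hle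
  have hkeys : lengths.keys = PySem.Set.ofList L := by
    rw [hle, pvStep_keys, hL, ← PySem.Set.update_map_eq_foldl_add,
        PySem.Dict.keys_empty, PySem.Set.update_nil_left]
  set K : List Int := PySem.List.sorted lengths.keys (fun x => x) true with hK
  have hndK : K.Nodup := ((PySem.List.sorted_perm lengths.keys (fun x => x) true).nodup_iff).mpr
    (by rw [hkeys]; exact PySem.Set.nodup_ofList L)
  have hmemK : ∀ a, a ∈ K ↔ a ∈ L := by
    intro a
    rw [hK, PySem.List.mem_sorted, hkeys, PySem.Set.mem_ofList]
  have hpwK : K.Pairwise (fun a b => b ≤ a) :=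
    PySem.List.sorted_pairwise_rev (κ := Int) lengths.keys (fun x => x)
  rw [PySem.List.foldl_append_eq_flatMap
        (g := fun length => PySem.List.sorted (lengths.getD length []) (fun x => x) true),
      List.nil_append,
      PySem.List.foldl_append_singleton_eq_map, List.nil_append, List.map_flatMap]
  rw [pvFlatMap_congr K _ (fun k => List.replicate (L.count k) k) ?_]
  · exact pvFlat_eq_sorted K L hndK hmemK hpwK
  · intro k hk
    have hget : lengths.getD k [] = words.filter (fun w => (w.length : Int) == k) := by
      rw [hle, pvStep_getD, PySem.Dict.getD_empty, List.nil_append]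
    rw [hget, pvGroup_map _ k ?_]
    · congr 1
      simp only [hL, List.count_eq_countP, ← List.countP_eq_length_filter, List.countP_map]
      rfl
    · intro w hw
      exact eq_of_beq (List.mem_filter.mp hw).2

-- ===== VERDICT (by name: the statement is the Claim_ definition above) =====
theorem word_lengths_spec : Claim_equal_word_lengths := by
  intro s _
  show word_lengths s = word_lengths_alt s
  simp only [word_lengths, word_lengths_alt]
  exact pvMain _
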